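-- pv_equiv track=rewrite | github.com/msrogerio/FTC_Atividade_04 | atividade_04.py | muda_estado
-- ===== SOURCE A (Python) =====
-- def muda_estado(valor, estado_atual):
--     estados =   [0, 1, 2, 3]
--
--     ## Percorre o vetor de estados
--     ## para cada condição é considerada o estado atual, informado no parâmetro da função, e o valor do binário
--     ## Considerando a regra de estágio do autômato ele atribui um valor para os estágio atual
--     for estado in estados:
--         if estado_atual == estado:
--             if valor == 0 and estado_atual == 0:
--                 estado_atual = 0
--                 break
--             if valor == 1 and estado_atual == 0:
--                 estado_atual = 1
--                 break
--             if valor == 1 and estado_atual == 1: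
--                 estado_atual = 1
--                 break
--             if valor == 0 and estado_atual == 1:
--                 estado_atual = 2
--                 break
--             if valor == 0 and estado_atual == 2:
--                 estado_atual = 0
--                 break
--             if valor == 1 and estado_atual == 2:
--                 estado_atual = 3
--                 break
--             if valor == 1 and estado_atual == 3:
--                 estado_atual = 3
--                 break
--             if valor == 0 and estado_atual == 3:
--                 estado_atual = 2
--                 break
--     return estado_atual
-- ===== SOURCE B (Python) =====
-- def muda_estado(valor, estado_atual):
--     # Bit-arithmetic view of the automaton: state = (b1 b0) in binary.
--     # On input 1 the next state is the state with bit0 set (x|1);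
--     # on input 0 it is bit0 shifted into bit1 (2*(x%2)).
--     if estado_atual in (0, 1, 2, 3) and valor in (0, 1):
--         low = estado_atual % 2
--         return estado_atual - low + 1 if valor == 1 else 2 * low
--     return estado_atual
-- ===== Notes on version B (the rewrite author's own statement) =====
-- stated objective: alternative
-- what changed: Replaces the loop over explicit per-(state,input) branches by a closed-form bit-arithmetic update on the 2-bit state encoding: input 1 sets the low bit (x - x%2 + 1), input 0 moves the low bit up (2*(x%2)); out-of-range inputs are left unchanged as in A.
import Mathlib
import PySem

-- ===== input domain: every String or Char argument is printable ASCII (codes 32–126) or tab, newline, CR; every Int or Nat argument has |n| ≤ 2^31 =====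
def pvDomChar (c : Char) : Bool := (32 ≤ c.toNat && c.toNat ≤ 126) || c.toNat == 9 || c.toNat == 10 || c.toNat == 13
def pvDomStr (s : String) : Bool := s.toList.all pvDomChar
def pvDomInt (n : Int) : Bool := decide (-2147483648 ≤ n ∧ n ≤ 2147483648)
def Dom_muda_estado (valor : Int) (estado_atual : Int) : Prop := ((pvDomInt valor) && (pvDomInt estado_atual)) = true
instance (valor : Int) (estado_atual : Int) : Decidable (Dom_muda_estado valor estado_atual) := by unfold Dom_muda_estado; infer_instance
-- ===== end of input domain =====

-- B replaces the loop over per-(state,input) branches by a closed-form bit-arithmetic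
-- update on the 2-bit state encoding (alternative decomposition, same cost).

-- ===== PORT A =====
-- literal transliteration of A's for-loop with break: recursion over the state list,
-- each iteration re-testing estado_atual against the guards in A's order.
def mudaLoopA (valor : Int) : List Int → Int → Int
  | [], estado_atual => estado_atual
  | estado :: rest, estado_atual =>
    if estado_atual == estado then
      if valor == 0 && estado_atual == 0 then 0
      else if valor == 1 && estado_atual == 0 then 1
      else if valor == 1 && estado_atual == 1 then 1
      else if valor == 0 && estado_atual == 1 then 2
      else if valor == 0 && estado_atual == 2 then 0
      else if valor == 1 && estado_atual == 2 then 3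
      else if valor == 1 && estado_atual == 3 then 3
      else if valor == 0 && estado_atual == 3 then 2
      else mudaLoopA valor rest estado_atual
    else mudaLoopA valor rest estado_atual

def muda_estado (valor : Int) (estado_atual : Int) : Int :=
  mudaLoopA valor [0, 1, 2, 3] estado_atual

-- ===== PORT B =====
-- PySem.Int.mod = Python's %, here with positive divisor 2
def muda_estado_alt (valor : Int) (estado_atual : Int) : Int :=
  if (estado_atual == 0 || estado_atual == 1 || estado_atual == 2 || estado_atual == 3)
      && (valor == 0 || valor == 1) then
    let low := PySem.Int.mod estado_atual 2
    if valor == 1 then estado_atual - low + 1 else 2 * low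
  else estado_atual

-- ===== PRECONDITION & SPEC =====
def Spec_muda_estado (valor : Int) (estado_atual : Int) (out : Int) : Prop := out = muda_estado_alt valor estado_atual
instance (valor : Int) (estado_atual : Int) (out : Int) : Decidable (Spec_muda_estado valor estado_atual out) := by unfold Spec_muda_estado; infer_instance

-- ===== CLAIM (what is proved, stated in full; the proofs are below) =====
def Claim_equal_muda_estado : Prop := ∀ (valor : Int) (estado_atual : Int), Dom_muda_estado valor estado_atual → Spec_muda_estado valor estado_atual (muda_estado valor estado_atual)

-- ===== LEMMAS AND PROOFS =====

-- ===== VERDICT (by name: the statement is the Claim_ definition above) =====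
theorem muda_estado_spec : Claim_equal_muda_estado := by
  intro v e _
  unfold Spec_muda_estado muda_estado muda_estado_alt
  by_cases h0 : e = 0 <;> by_cases h1 : e = 1 <;> by_cases h2 : e = 2 <;> by_cases h3 : e = 3 <;>
    by_cases hv0 : v = 0 <;> by_cases hv1 : v = 1 <;>
    simp_all [mudaLoopA, PySem.Int.mod]
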